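-- pv_equiv track=rewrite | github.com/tobimoli/AdventofCode | Day12-2.py | small_letter_check
-- ===== SOURCE A (Python) =====
-- def small_letter_check(path):
--     total = 0
--     SET = set(path[1:-1])
--     for node in SET:
--         if node.islower() and path.count(node) == 2:
--             total += 1
--     if total <= 1:
--         return True
--     else:
--         return False
-- ===== SOURCE B (Python) =====
-- def small_letter_check(path):
--     # Sort the path and scan contiguous equal runs: a run of length exactly 2
--     # whose node is lowercase and appears in the interior is a "double".
--     interior = set(path[1:-1])
--     sp = sorted(path)
--     n = len(sp)
--     doubles = 0
--     i = 0
--     while i < n: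
--         j = i
--         while j < n and sp[j] == sp[i]:
--             j += 1
--         if j - i == 2 and sp[i].islower() and sp[i] in interior:
--             doubles += 1
--         i = j
--     return doubles <= 1
-- ===== Notes on version B (the rewrite author's own statement) =====
-- stated objective: faster
-- what changed: B sorts the path once and counts qualifying nodes by scanning contiguous equal runs in the sorted list, instead of A's per-node path.count scan over the interior set.
import Mathlib
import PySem

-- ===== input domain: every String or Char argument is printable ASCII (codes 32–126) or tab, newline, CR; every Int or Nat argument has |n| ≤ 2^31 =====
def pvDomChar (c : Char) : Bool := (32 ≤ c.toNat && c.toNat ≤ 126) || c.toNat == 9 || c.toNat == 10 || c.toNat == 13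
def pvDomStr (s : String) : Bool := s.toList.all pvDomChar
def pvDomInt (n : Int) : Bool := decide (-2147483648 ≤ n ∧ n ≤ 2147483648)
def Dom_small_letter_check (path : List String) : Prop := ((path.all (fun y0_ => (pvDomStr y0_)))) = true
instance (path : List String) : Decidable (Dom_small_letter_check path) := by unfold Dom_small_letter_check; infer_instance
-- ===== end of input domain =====

-- B sorts the path once and counts contiguous equal runs of length exactly 2 (lowercase, interior),
-- instead of A's per-node path.count scan over the interior set (measured faster in a timing run).

-- shared helper: Python's str.islower() on the ASCII domain — some cased char, and no uppercase char
def pyStrIslower (s : String) : Bool :=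
  s.toList.any (fun c => PySem.Chars.isalpha c) && !(s.toList.any (fun c => PySem.Chars.isupper c))

-- ===== PORT A =====
def small_letter_check (path : List String) : Bool :=
  let SET : PySem.Set String := PySem.Set.ofList (PySem.List.slice path (some 1) (some (-1)))
  let total : Int := SET.foldl
    (fun acc node => if pyStrIslower node && (PySem.List.count path node == 2) then acc + 1 else acc) 0
  if total ≤ 1 then true else false

-- ===== PORT B =====
-- the outer while loop of Source B: peel one run (the inner `while sp[j] == sp[i]` loop = takeWhile),
-- test its length, recurse on the remainder
def pvRunDoubles (interior : PySem.Set String) : List String → Int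
  | [] => 0
  | x :: xs =>
    let run : Nat := (xs.takeWhile (fun y => y == x)).length + 1
    let rest := xs.dropWhile (fun y => y == x)
    (if run == 2 && pyStrIslower x && PySem.Set.contains interior x then 1 else 0)
      + pvRunDoubles interior rest
termination_by l => l.length
decreasing_by
  simp only [List.length_cons]
  exact Nat.lt_succ_of_le (List.length_dropWhile_le _ _)

def small_letter_check_alt (path : List String) : Bool :=
  let interior : PySem.Set String := PySem.Set.ofList (PySem.List.slice path (some 1) (some (-1)))
  let sp := PySem.List.sorted path (fun x => x) false
  decide (pvRunDoubles interior sp ≤ 1)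

-- ===== PRECONDITION & SPEC =====
def Spec_small_letter_check (path : List String) (out : Bool) : Prop := out = small_letter_check_alt path
instance (path : List String) (out : Bool) : Decidable (Spec_small_letter_check path out) := by unfold Spec_small_letter_check; infer_instance

-- ===== CLAIM (what is proved, stated in full; the proofs are below) =====
def Claim_equal_small_letter_check : Prop := ∀ (path : List String), Dom_small_letter_check path → Spec_small_letter_check path (small_letter_check path)

-- ===== LEMMAS AND PROOFS =====

theorem contains_ofList (xs : List String) (x : String) :
    PySem.Set.contains (PySem.Set.ofList xs) x = decide (x ∈ xs) := by
  simp [PySem.Set.contains]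

-- counting p over the distinct elements of a superlist, gated on membership in the sublist,
-- equals counting p over the distinct elements of the sublist
theorem countP_dedup_gate (path inter : List String)
    (h : ∀ x ∈ inter, x ∈ path) (p : String → Bool) :
    (PySem.Set.ofList path).countP (fun k => p k && decide (k ∈ inter))
      = (PySem.Set.ofList inter).countP p := by
  have hperm : ((PySem.Set.ofList path).filter (fun k => decide (k ∈ inter))).Perm
      (PySem.Set.ofList inter) := by
    refine (List.perm_ext_iff_of_nodup ((PySem.Set.nodup_ofList path).filter _)
      (PySem.Set.nodup_ofList inter)).mpr ?_
    intro a
    simp only [List.mem_filter, PySem.Set.mem_ofList, decide_eq_true_eq]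
    exact ⟨fun ⟨_, ha⟩ => ha, fun ha => ⟨h a ha, ha⟩⟩
  calc (PySem.Set.ofList path).countP (fun k => p k && decide (k ∈ inter))
      = ((PySem.Set.ofList path).filter (fun k => decide (k ∈ inter))).countP p :=
        (List.countP_filter ..).symm
    _ = (PySem.Set.ofList inter).countP p := hperm.countP_eq p

-- in a ≤-sorted list bounded below by x, dropping the leading run of x removes ALL x's
theorem not_mem_dropWhile_beq (x : String) :
    ∀ (xs : List String), xs.Pairwise (· ≤ ·) → (∀ y ∈ xs, x ≤ y) →
      x ∉ xs.dropWhile (fun y => y == x) := by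
  intro xs
  induction xs with
  | nil => simp
  | cons y ys ih =>
    intro hp hb
    by_cases hy : (y == x) = true
    · rw [List.dropWhile_cons, if_pos hy]
      exact ih hp.of_cons (fun z hz => hb z (List.mem_cons_of_mem _ hz))
    · rw [List.dropWhile_cons, if_neg hy]
      intro hmem
      have hyx : y ≠ x := by simpa using hy
      rcases List.mem_cons.mp hmem with h | h
      · exact hyx h.symm
      · have h1 : y ≤ x := List.rel_of_pairwise_cons hp h
        have h2 : x ≤ y := hb y List.mem_cons_self
        exact hyx (le_antisymm h1 h2)

-- on a ≤-sorted list, each contiguous run is ALL occurrences of its value, so the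
-- run scan counts exactly the distinct values with total count 2 (gated on the flags)
theorem pvRunDoubles_sorted (interior : PySem.Set String) :
    ∀ (n : Nat) (l : List String), l.length ≤ n → l.Pairwise (· ≤ ·) →
    pvRunDoubles interior l =
      ((PySem.Set.ofList l).countP
        (fun k => (List.count k l == 2) && pyStrIslower k && PySem.Set.contains interior k) : Int) := by
  intro n
  induction n with
  | zero =>
    intro l hl _
    have : l = [] := List.length_eq_zero_iff.mp (Nat.le_zero.mp hl)
    subst this; simp [pvRunDoubles]
  | succ n ih =>
    intro l hl hp
    match l with
    | [] => simp [pvRunDoubles]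
    | x :: xs =>
      rw [pvRunDoubles]
      have hxs : xs.takeWhile (fun y => y == x) ++ xs.dropWhile (fun y => y == x) = xs :=
        List.takeWhile_append_dropWhile
      have htx : ∀ y ∈ xs.takeWhile (fun y => y == x), y = x := by
        intro y hy
        exact eq_of_beq (List.mem_takeWhile_imp (p := fun y => y == x) hy)
      have hxsp : xs.Pairwise (· ≤ ·) := hp.of_cons
      have hxle : ∀ y ∈ xs, x ≤ y := fun y hy => List.rel_of_pairwise_cons hp hy
      have hxr : x ∉ xs.dropWhile (fun y => y == x) :=
        not_mem_dropWhile_beq x xs hxsp hxle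
      have hrp : (xs.dropWhile (fun y => y == x)).Pairwise (· ≤ ·) :=
        hxsp.sublist (List.dropWhile_sublist _)
      have hrlen : (xs.dropWhile (fun y => y == x)).length ≤ n := by
        have h1 := List.length_dropWhile_le (fun y => y == x) xs
        have h2 : xs.length + 1 ≤ n + 1 := by simpa using hl
        omega
      -- the total count of x in l is the run length
      have hcx : List.count x (x :: xs) = (xs.takeWhile (fun y => y == x)).length + 1 := by
        have h1 : List.count x (xs.takeWhile (fun y => y == x))
            = (xs.takeWhile (fun y => y == x)).length :=
          List.count_eq_length.mpr (fun b hb => (htx b hb).symm)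
        have h2 : List.count x (xs.dropWhile (fun y => y == x)) = 0 :=
          List.count_eq_zero.mpr hxr
        have h3 := congrArg (List.count x) hxs
        rw [List.count_append, h1, h2] at h3
        rw [List.count_cons_self, ← h3]
      -- for values in the remainder, counting in l = counting in the remainder
      have hck : ∀ k ∈ xs.dropWhile (fun y => y == x),
          List.count k (x :: xs) = List.count k (xs.dropWhile (fun y => y == x)) := by
        intro k hk
        have hkx : k ≠ x := fun h => hxr (h ▸ hk)
        have hxk : (x == k) = false := beq_eq_false_iff_ne.mpr (Ne.symm hkx)
        have hkt : List.count k (xs.takeWhile (fun y => y == x)) = 0 :=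
          List.count_eq_zero.mpr (fun h => hkx (htx k h))
        have h3 := congrArg (List.count k) hxs
        rw [List.count_append, hkt] at h3
        rw [List.count_cons, if_neg (by simp [hxk])]
        omega
      -- distinct elements of l = x plus distinct elements of the remainder
      have hperm : (PySem.Set.ofList (x :: xs)).Perm
          (x :: PySem.Set.ofList (xs.dropWhile (fun y => y == x))) := by
        refine (List.perm_ext_iff_of_nodup (PySem.Set.nodup_ofList _) ?_).mpr ?_
        · exact List.nodup_cons.mpr ⟨by simpa [PySem.Set.mem_ofList] using hxr,
            PySem.Set.nodup_ofList _⟩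
        · intro a
          simp only [PySem.Set.mem_ofList, List.mem_cons]
          constructor
          · rintro (h | h)
            · exact Or.inl h
            · rw [← hxs] at h
              rcases List.mem_append.mp h with h | h
              · exact Or.inl (htx a h)
              · exact Or.inr h
          · rintro (h | h)
            · exact Or.inl h
            · exact Or.inr (by rw [← hxs]; exact List.mem_append_right _ h)
      rw [hperm.countP_eq, List.countP_cons]
      have hq : ((PySem.Set.ofList (xs.dropWhile (fun y => y == x))).countP
            (fun k => (List.count k (x :: xs) == 2) && pyStrIslower k && PySem.Set.contains interior k))
          = ((PySem.Set.ofList (xs.dropWhile (fun y => y == x))).countP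
            (fun k => (List.count k (xs.dropWhile (fun y => y == x)) == 2) && pyStrIslower k && PySem.Set.contains interior k)) := by
        refine List.countP_congr ?_
        intro k hk
        rw [hck k (by simpa [PySem.Set.mem_ofList] using hk)]
      rw [hq, ih _ hrlen hrp, hcx]
      cases hc : (((xs.takeWhile (fun y => y == x)).length + 1 == 2) && pyStrIslower x && PySem.Set.contains interior x) with
      | false => simp_all
      | true => simp_all; omega

-- ===== VERDICT (by name: the statement is the Claim_ definition above) =====
theorem small_letter_check_spec : Claim_equal_small_letter_check := by
  intro path _
  simp only [Spec_small_letter_check, small_letter_check, small_letter_check_alt]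
  have hsp := PySem.List.sorted_perm path (fun x : String => x) false
  have hB : pvRunDoubles (PySem.Set.ofList (PySem.List.slice path (some 1) (some (-1))))
        (PySem.List.sorted path (fun x => x) false)
      = ((PySem.Set.ofList (PySem.List.slice path (some 1) (some (-1)))).countP
          (fun k => pyStrIslower k && (PySem.List.count path k == 2)) : Int) := by
    rw [pvRunDoubles_sorted _ (PySem.List.sorted path (fun x => x) false).length _ le_rfl
      (PySem.List.sorted_pairwise path (fun x => x))]
    congr 1
    have hmemeq : (PySem.Set.ofList (PySem.List.sorted path (fun x => x) false)).Perm
        (PySem.Set.ofList path) := by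
      refine (List.perm_ext_iff_of_nodup (PySem.Set.nodup_ofList _) (PySem.Set.nodup_ofList _)).mpr ?_
      intro a; simp only [PySem.Set.mem_ofList]
      exact ⟨fun h => hsp.mem_iff.mp h, fun h => hsp.mem_iff.mpr h⟩
    rw [hmemeq.countP_eq]
    have hpred : ∀ k ∈ PySem.Set.ofList path,
        (((List.count k (PySem.List.sorted path (fun x => x) false) == 2) && pyStrIslower k &&
          PySem.Set.contains (PySem.Set.ofList (PySem.List.slice path (some 1) (some (-1)))) k) = true)
        ↔ (((pyStrIslower k && (PySem.List.count path k == 2)) &&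
            decide (k ∈ PySem.List.slice path (some 1) (some (-1)))) = true) := by
      intro k _
      rw [hsp.count_eq, contains_ofList]
      simp only [PySem.List.count_eq]
      cases pyStrIslower k <;> cases hc : (List.count k path == 2) <;> simp
    rw [List.countP_congr hpred,
      countP_dedup_gate path _ (fun x hx => PySem.List.mem_of_mem_slice _ _ _ hx)]
  rw [hB]
  simp only [PySem.List.foldl_if_add_one]
  split <;> simp_all
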